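-- pv_equiv track=rewrite | github.com/ThalesGroup/CRDP-Stress | parallel_execution.py | distribute_workload
-- ===== SOURCE A (Python) =====
-- def distribute_workload(total_count, num_tasks):
--     """
--     Divide total_count into num_tasks chunks.
--     Returns list of (start_index, count) tuples.
--
--     Example: distribute_workload(1000, 3) -> [(0, 334), (334, 333), (667, 333)]
--     """
--     if num_tasks <= 0:
--         raise ValueError("num_tasks must be > 0")
--     if total_count <= 0:
--         raise ValueError("total_count must be > 0")
--
--     base_size = total_count // num_tasks
--     remainder = total_count % num_tasks
--
--     workload = []
--     current_start = 0
--
--     for i in range(num_tasks):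
--         # Distribute remainder across first few tasks
--         chunk_size = base_size + (1 if i < remainder else 0)
--         workload.append((current_start, chunk_size))
--         current_start += chunk_size
--
--     return workload
-- ===== SOURCE B (Python) =====
-- def distribute_workload(total_count, num_tasks):
--     """
--     Divide total_count into num_tasks chunks.
--     Returns list of (start_index, count) tuples.
--     """
--     if num_tasks <= 0:
--         raise ValueError("num_tasks must be > 0")
--     if total_count <= 0:
--         raise ValueError("total_count must be > 0")
--     chunks = []
--     start, remaining, tasks = 0, total_count, num_tasks
--     while tasks > 0:
--         # each step peels off the ceiling of an even split of what is left
--         size = -(-remaining // tasks)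
--         chunks.append((start, size))
--         start += size
--         remaining -= size
--         tasks -= 1
--     return chunks
-- ===== Notes on version B (the rewrite author's own statement) =====
-- stated objective: alternative
-- what changed: Replaces the single base/remainder loop with a running start by a recursive peel: each call emits the next chunk as the ceiling of an even split of what remains over the remaining tasks, then recurses on the rest.
import Mathlib
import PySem

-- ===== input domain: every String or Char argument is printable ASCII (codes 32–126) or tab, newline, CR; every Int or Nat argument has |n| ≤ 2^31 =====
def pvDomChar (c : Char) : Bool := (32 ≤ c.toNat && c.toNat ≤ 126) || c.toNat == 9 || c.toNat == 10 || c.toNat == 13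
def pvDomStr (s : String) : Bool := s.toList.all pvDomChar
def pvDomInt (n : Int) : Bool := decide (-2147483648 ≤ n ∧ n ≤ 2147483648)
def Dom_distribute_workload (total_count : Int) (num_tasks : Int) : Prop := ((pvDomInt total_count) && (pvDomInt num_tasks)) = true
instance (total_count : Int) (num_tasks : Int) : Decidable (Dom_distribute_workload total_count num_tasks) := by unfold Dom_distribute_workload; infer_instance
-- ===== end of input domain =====

-- B replaces A's base/remainder loop with a recursive peel (next chunk = ceiling of an even
-- split of the remainder over the remaining tasks): a different decomposition, same cost.

-- ===== PORT A =====
-- A raises ValueError when num_tasks ≤ 0 or total_count ≤ 0; those inputs are outside Pre_ (port returns [] there).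
def distribute_workload (total_count : Int) (num_tasks : Int) : List (Int × Int) :=
  if num_tasks ≤ 0 then []
  else if total_count ≤ 0 then []
  else
    let base_size := PySem.Int.floordiv total_count num_tasks
    let remainder := PySem.Int.mod total_count num_tasks
    ((PySem.List.pyRange 0 num_tasks 1).foldl
      (fun (st : List (Int × Int) × Int) i =>
        let chunk_size := base_size + (if i < remainder then 1 else 0)
        (st.1 ++ [(st.2, chunk_size)], st.2 + chunk_size))
      ([], 0)).1

-- ===== PORT B =====
-- B's while loop over state (start, remaining, tasks), as structural recursion on the countdown tasks (≥ 0 at the call).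
def dw_chunks (start remaining : Int) : Nat → List (Int × Int)
  | 0 => []
  | Nat.succ k =>
      let size := -(PySem.Int.floordiv (-remaining) ((k : Int) + 1))  -- -(-remaining // tasks)
      (start, size) :: dw_chunks (start + size) (remaining - size) k

def distribute_workload_alt (total_count : Int) (num_tasks : Int) : List (Int × Int) :=
  if num_tasks ≤ 0 then []
  else if total_count ≤ 0 then []
  else dw_chunks 0 total_count num_tasks.toNat

-- ===== PRECONDITION & SPEC =====
-- Pre_ excludes exactly the inputs on which A (and B) raise ValueError.
def Pre_distribute_workload (total_count : Int) (num_tasks : Int) : Prop :=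
  0 < num_tasks ∧ 0 < total_count
instance (total_count : Int) (num_tasks : Int) : Decidable (Pre_distribute_workload total_count num_tasks) := by unfold Pre_distribute_workload; infer_instance
def pvWitness_distribute_workload : Int × Int := (1000, 3)

def Spec_distribute_workload (total_count : Int) (num_tasks : Int) (out : List (Int × Int)) : Prop := out = distribute_workload_alt total_count num_tasks
instance (total_count : Int) (num_tasks : Int) (out : List (Int × Int)) : Decidable (Spec_distribute_workload total_count num_tasks out) := by unfold Spec_distribute_workload; infer_instance

-- ===== CLAIM =====
def Claim_equal_distribute_workload : Prop := ∀ (total_count : Int) (num_tasks : Int), Dom_distribute_workload total_count num_tasks → Pre_distribute_workload total_count num_tasks → Spec_distribute_workload total_count num_tasks (distribute_workload total_count num_tasks)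

-- ===== LEMMAS AND PROOFS =====

-- A's loop invariant: after range(0, m) the workload is the closed-form map and
-- current_start is base*m + min m r.
theorem dw_foldl_invariant (base r : Int) (hr : 0 ≤ r) (m : Nat) :
    (PySem.List.pyRange 0 (m : Int) 1).foldl
      (fun (st : List (Int × Int) × Int) i =>
        (st.1 ++ [(st.2, base + (if i < r then 1 else 0))],
         st.2 + (base + (if i < r then 1 else 0))))
      ([], 0)
    = ((PySem.List.pyRange 0 (m : Int) 1).map
        (fun i => (base * i + min i r, base + (if i < r then 1 else 0))),
       base * m + min (m : Int) r) := by
  induction m with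
  | zero => simp [PySem.List.pyRange_one_eq_nil (by norm_num : (0:Int) ≤ 0)]; omega
  | succ k ih =>
      have h : ((k + 1 : Nat) : Int) = (k : Int) + 1 := by push_cast; ring
      rw [h, PySem.List.pyRange_one_succ_right (by positivity), List.foldl_append,
          List.map_append, ih]
      simp only [List.foldl_cons, List.foldl_nil, List.map_cons, List.map_nil]
      have hb : base * ((k : Int) + 1) = base * k + base := by ring
      rw [Prod.mk.injEq]
      refine ⟨rfl, ?_⟩
      rw [hb]
      split_ifs with h <;> omega

-- B's recursion computes the same closed form: peeling ceil(remaining/tasks) each step.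
theorem dw_chunks_eq (base : Int) : ∀ (k : Nat) (s rem : Int), 0 ≤ rem → (0 < k → rem < k) →
    dw_chunks s (base * k + rem) k
    = (List.range k).map
        (fun (i : Nat) => (s + base * (i : Int) + min (i : Int) rem,
          base + (if (i : Int) < rem then 1 else 0))) := by
  intro k
  induction k with
  | zero => intro s rem _ _; simp [dw_chunks]
  | succ k ih =>
      intro s rem hr hk
      have hk' : rem < (k : Int) + 1 := by
        have := hk (Nat.succ_pos k); exact_mod_cast this
      have hsize : -(PySem.Int.floordiv (-(base * ((k+1 : Nat) : Int) + rem)) ((k : Int) + 1))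
          = base + (if 0 < rem then 1 else 0) := by
        rw [PySem.Int.neg_floordiv_neg_eq_iff_of_pos (by positivity)]
        push_cast
        constructor <;> (split_ifs <;> nlinarith)
      simp only [dw_chunks, hsize]
      have hrem : base * ((k+1 : Nat) : Int) + rem - (base + (if 0 < rem then 1 else 0))
          = base * (k : Nat) + (if 0 < rem then rem - 1 else rem) := by
        push_cast; split_ifs <;> ring
      rw [hrem, ih (s + (base + if 0 < rem then 1 else 0)) _
            (by split_ifs <;> omega)
            (by intro hkpos; split_ifs <;> [omega; omega])]
      rw [List.range_succ_eq_map, List.map_cons, List.map_map]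
      refine congrArg₂ _ ?_ (List.map_congr_left ?_)
      · simp; omega
      · intro i _
        simp only [Function.comp]
        have hc : ((i.succ : Nat) : Int) = (i : Int) + 1 := by push_cast; ring
        rw [hc]
        have hb : base * ((i : Int) + 1) = base * (i : Int) + base := by ring
        rw [Prod.mk.injEq, hb]
        constructor
        · generalize base * (i : Int) = p
          split_ifs <;> omega
        · split_ifs <;> omega

-- ===== VERDICT =====
theorem distribute_workload_spec : Claim_equal_distribute_workload := by
  intro t n _ hpre
  obtain ⟨hn, ht⟩ := hpre
  unfold Spec_distribute_workload distribute_workload distribute_workload_alt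
  rw [if_neg (by omega), if_neg (by omega), if_neg (by omega), if_neg (by omega)]
  set base := PySem.Int.floordiv t n with hbase
  set rem := PySem.Int.mod t n with hrem
  have hr0 : 0 ≤ rem ∧ rem < n := by
    rw [hrem, PySem.Int.mod_eq_emod_of_pos hn]
    exact ⟨Int.emod_nonneg t (by omega), Int.emod_lt_of_pos t hn⟩
  have hcast : ((n.toNat : Nat) : Int) = n := Int.toNat_of_nonneg (by omega)
  have hA := dw_foldl_invariant base rem hr0.1 n.toNat
  rw [hcast] at hA
  have ht' : t = base * ((n.toNat : Nat) : Int) + rem := by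
    rw [hcast, hbase, hrem]
    have := PySem.Int.floordiv_mul_add_mod t n
    linarith
  have hB := dw_chunks_eq base n.toNat 0 rem hr0.1
      (by intro _; rw [← hcast] at hr0; exact_mod_cast hr0.2)
  rw [ht', hB]
  have := congrArg Prod.fst hA
  simp only at this
  rw [this, PySem.List.pyRange_one, List.map_map]
  have hn0 : ((n - 0).toNat) = n.toNat := by omega
  rw [hn0]
  refine List.map_congr_left ?_
  intro i _
  simp [Function.comp]
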